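-- pv_equiv track=rewrite | github.com/kkrotW/CS591-guitar | FinalProject.py | simpledistortion
-- ===== SOURCE A (Python) =====
-- def simpledistortion(A,X):
--     """Simple distortion that cuts off every peaks to the value X away both sides from the peak."""
--     B=[]
--     B += [x for x in A]
--
--     for i in range(X,len(A)-X):
--         if (A[i] > 0) and (A[i] > A[i-1]) and (A[i] > A[i+1]):
--             B[i-X:i+X+1]=[A[i-X]]*(2*X+1)
--
--         elif (A[i] < 0) and (A[i] < A[i-1]) and (A[i] < A[i+1]):
--
--             B[i-X:i+X+1]=[A[i-X]]*(2*X+1)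
--     return B
-- ===== SOURCE B (Python) =====
-- def simpledistortion(A, X):
--     """Simple distortion that cuts off every peaks to the value X away both sides from the peak."""
--     n = len(A)
--     peaks = [i for i in range(X, n - X)
--              if (A[i] > 0 and A[i] > A[i - 1] and A[i] > A[i + 1])
--              or (A[i] < 0 and A[i] < A[i - 1] and A[i] < A[i + 1])]
--     B = list(A)
--     f = n  # leftmost index already finalized by a later peak
--     for p in reversed(peaks):
--         lo = p - X
--         v = A[lo]
--         for k in range(min(p + X, f - 1), lo - 1, -1):
--             B[k] = v
--         f = lo
--     return B
-- ===== Notes on version B (the rewrite author's own statement) =====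
-- stated objective: alternative
-- what changed: Instead of rewriting a 2X+1-wide slice for every peak as it scans, B collects the peak indices in one pass and then fills the windows right-to-left with a shrinking frontier so each output cell is written at most once (last-writer-wins); A does O(n*X) write work in the worst case, B O(n).
-- outside the precondition, e.g. on simpledistortion([5], 0): A returns [5], B returns [5]
import Mathlib
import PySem

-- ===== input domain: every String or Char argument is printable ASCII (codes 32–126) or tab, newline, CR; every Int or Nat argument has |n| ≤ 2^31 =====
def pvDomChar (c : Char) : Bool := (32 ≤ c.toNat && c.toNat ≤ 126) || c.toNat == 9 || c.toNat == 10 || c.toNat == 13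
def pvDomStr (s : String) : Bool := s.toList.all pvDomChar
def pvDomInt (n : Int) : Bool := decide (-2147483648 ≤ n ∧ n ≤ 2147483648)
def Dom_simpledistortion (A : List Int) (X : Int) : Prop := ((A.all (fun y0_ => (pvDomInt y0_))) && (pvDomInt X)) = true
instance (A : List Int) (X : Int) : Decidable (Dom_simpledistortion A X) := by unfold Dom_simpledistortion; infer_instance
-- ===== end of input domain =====

-- B collects the peak indices in one pass and fills each window right-to-left, writing every
-- output cell at most once (last-writer-wins), instead of A's per-peak window rewrite.

-- ===== PORT A =====
-- slice assignment b[lo:stop] = [v]*r; exact for 0 ≤ lo ≤ stop ≤ len b and r = stop - lo,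
-- which holds at every use under Pre_ (X ≥ 1, lo = i-X, stop = i+X+1, r = 2X+1)
def pvWriteWin (b : List Int) (lo r stop : Int) (v : Int) : List Int :=
  b.take lo.toNat ++ List.replicate r.toNat v ++ b.drop stop.toNat

def simpledistortion (A : List Int) (X : Int) : List Int :=
  -- B = []; B += [x for x in A]
  let B : List Int := [] ++ A.map (fun x => x)
  (PySem.List.pyRange X (PySem.List.len A - X) 1).foldl (fun B i =>
    if PySem.List.pyGetD A i 0 > 0 ∧ PySem.List.pyGetD A i 0 > PySem.List.pyGetD A (i-1) 0 ∧
       PySem.List.pyGetD A i 0 > PySem.List.pyGetD A (i+1) 0 then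
      pvWriteWin B (i - X) (2*X + 1) (i + X + 1) (PySem.List.pyGetD A (i - X) 0)
    else if PySem.List.pyGetD A i 0 < 0 ∧ PySem.List.pyGetD A i 0 < PySem.List.pyGetD A (i-1) 0 ∧
            PySem.List.pyGetD A i 0 < PySem.List.pyGetD A (i+1) 0 then
      pvWriteWin B (i - X) (2*X + 1) (i + X + 1) (PySem.List.pyGetD A (i - X) 0)
    else B) B

-- ===== PORT B =====
-- the peak test of the comprehension, as one predicate
def pvPk (A : List Int) (X : Int) (i : Int) : Bool :=
  (decide (PySem.List.pyGetD A i 0 > 0 ∧ PySem.List.pyGetD A i 0 > PySem.List.pyGetD A (i-1) 0 ∧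
           PySem.List.pyGetD A i 0 > PySem.List.pyGetD A (i+1) 0) ||
   decide (PySem.List.pyGetD A i 0 < 0 ∧ PySem.List.pyGetD A i 0 < PySem.List.pyGetD A (i-1) 0 ∧
           PySem.List.pyGetD A i 0 < PySem.List.pyGetD A (i+1) 0))

-- the body of B's loop: fill B[k] = A[lo] for k from min(p+X, f-1) down to lo = p-X, new frontier lo
def pvFill (A : List Int) (X : Int) (st : List Int × Int) (p : Int) : List Int × Int :=
  let lo := p - X
  let v := PySem.List.pyGetD A lo 0
  ((PySem.List.pyRange (min (p + X) (st.2 - 1)) (lo - 1) (-1)).foldl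
     (fun c k => PySem.List.pySetD c k v) st.1, lo)

def simpledistortion_alt (A : List Int) (X : Int) : List Int :=
  let n : Int := PySem.List.len A
  let peaks : List Int := (PySem.List.pyRange X (n - X) 1).filter (pvPk A X)
  let B : List Int := A.map (fun x => x)
  (peaks.reverse.foldl (pvFill A X) (B, n)).1

-- ===== PRECONDITION & SPEC =====
-- Pre_ requires X ≥ 1: for X < 0 A always raises IndexError, and for X = 0 A raises IndexError
-- whenever the last element is a strict positive peak / negative trough, so the degenerate
-- window size X ≤ 0 is excluded wholesale.
def Pre_simpledistortion (A : List Int) (X : Int) : Prop := 1 ≤ X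
instance (A : List Int) (X : Int) : Decidable (Pre_simpledistortion A X) := by unfold Pre_simpledistortion; infer_instance
def pvWitness_simpledistortion : List Int × Int := ([1, 3, 1, 0], 1)

def Spec_simpledistortion (A : List Int) (X : Int) (out : List Int) : Prop := out = simpledistortion_alt A X
instance (A : List Int) (X : Int) (out : List Int) : Decidable (Spec_simpledistortion A X out) := by unfold Spec_simpledistortion; infer_instance

-- ===== CLAIM (what is proved, stated in full; the proofs are below) =====
def Claim_equal_simpledistortion : Prop := ∀ (A : List Int) (X : Int), Dom_simpledistortion A X → Pre_simpledistortion A X → Spec_simpledistortion A X (simpledistortion A X)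

-- ===== LEMMAS AND PROOFS =====

-- "index j is inside the window of peak p"
def pvHit (X : Int) (j : Nat) (p : Int) : Bool := decide (p - X ≤ (j : Int) ∧ (j : Int) ≤ p + X)

lemma length_pvWriteWin (b : List Int) (lo r stop v : Int) (h0 : 0 ≤ lo) (hr : 0 ≤ r)
    (hsum : lo + r = stop) (hstop : stop.toNat ≤ b.length) :
    (pvWriteWin b lo r stop v).length = b.length := by
  simp [pvWriteWin]; omega

lemma getElem?_pvWriteWin (b : List Int) (lo r stop v : Int) (h0 : 0 ≤ lo) (hr : 0 ≤ r)
    (hsum : lo + r = stop) (hstop : stop.toNat ≤ b.length) (j : Nat) :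
    (pvWriteWin b lo r stop v)[j]? = if lo ≤ (j:Int) ∧ (j:Int) < stop then some v else b[j]? := by
  unfold pvWriteWin
  rcases lt_or_ge j lo.toNat with h | h
  · rw [List.getElem?_append_left (by simp; omega), List.getElem?_append_left (by simp; omega),
      List.getElem?_take]
    simp [h]; intro h1; omega
  · rcases lt_or_ge j stop.toNat with h2 | h2
    · rw [List.getElem?_append_left (by simp; omega),
        List.getElem?_append_right (by simp; omega), List.getElem?_replicate]
      simp
      have hmin : min lo.toNat b.length = lo.toNat := by omega
      rw [hmin, if_pos (by omega : ((j - lo.toNat : Nat) : Int) < r), if_pos ⟨by omega, by omega⟩]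
    · rw [List.getElem?_append_right (by simp; omega), List.getElem?_drop]
      simp
      have hmin : min lo.toNat b.length = lo.toNat := by omega
      rw [hmin]
      have hidx : stop.toNat + (j - (lo.toNat + r.toNat)) = j := by omega
      rw [hidx, if_neg (by omega)]

-- A's loop body skipped on non-peaks equals folding the window write over the filtered list
lemma foldA_eq_filter (A : List Int) (X : Int) :
    ∀ (L : List Int) (B : List Int),
      L.foldl (fun B i =>
        if PySem.List.pyGetD A i 0 > 0 ∧ PySem.List.pyGetD A i 0 > PySem.List.pyGetD A (i-1) 0 ∧
           PySem.List.pyGetD A i 0 > PySem.List.pyGetD A (i+1) 0 then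
          pvWriteWin B (i - X) (2*X + 1) (i + X + 1) (PySem.List.pyGetD A (i - X) 0)
        else if PySem.List.pyGetD A i 0 < 0 ∧ PySem.List.pyGetD A i 0 < PySem.List.pyGetD A (i-1) 0 ∧
                PySem.List.pyGetD A i 0 < PySem.List.pyGetD A (i+1) 0 then
          pvWriteWin B (i - X) (2*X + 1) (i + X + 1) (PySem.List.pyGetD A (i - X) 0)
        else B) B
      = (L.filter (pvPk A X)).foldl
          (fun B i => pvWriteWin B (i - X) (2*X + 1) (i + X + 1) (PySem.List.pyGetD A (i - X) 0)) B := by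
  intro L
  induction L with
  | nil => intro B; rfl
  | cons i t ih =>
    intro B
    by_cases h1 : PySem.List.pyGetD A i 0 > 0 ∧ PySem.List.pyGetD A i 0 > PySem.List.pyGetD A (i-1) 0 ∧
        PySem.List.pyGetD A i 0 > PySem.List.pyGetD A (i+1) 0
    · have hpk : pvPk A X i = true := by simp [pvPk, h1]
      rw [List.foldl_cons, if_pos h1, List.filter_cons, if_pos hpk, List.foldl_cons]
      exact ih _
    · by_cases h2 : PySem.List.pyGetD A i 0 < 0 ∧ PySem.List.pyGetD A i 0 < PySem.List.pyGetD A (i-1) 0 ∧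
          PySem.List.pyGetD A i 0 < PySem.List.pyGetD A (i+1) 0
      · have hpk : pvPk A X i = true := by simp [pvPk, h2]
        rw [List.foldl_cons, if_neg h1, if_pos h2, List.filter_cons, if_pos hpk, List.foldl_cons]
        exact ih _
      · have hpk : ¬ pvPk A X i = true := by simp [pvPk, h1, h2]
        rw [List.foldl_cons, if_neg h1, if_neg h2, List.filter_cons, if_neg hpk]
        exact ih _

-- length is preserved along A's write fold
lemma foldA_length (A : List Int) (X : Int) (hX : 1 ≤ X) :
    ∀ (ps : List Int), (∀ p ∈ ps, X ≤ p ∧ p + X < (A.length : Int)) →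
      ∀ (B : List Int), B.length = A.length →
      ((ps.foldl (fun B i => pvWriteWin B (i - X) (2*X + 1) (i + X + 1)
          (PySem.List.pyGetD A (i - X) 0)) B)).length = A.length := by
  intro ps
  induction ps with
  | nil => intro _ B hB; exact hB
  | cons p t ih =>
    intro hb B hB
    have hp := hb p List.mem_cons_self
    simp only [List.foldl_cons]
    refine ih (fun q hq => hb q (List.mem_cons_of_mem _ hq)) _ ?_
    rw [length_pvWriteWin _ _ _ _ _ (by omega) (by omega) (by ring) (by omega)]
    exact hB

-- pointwise characterisation of A's write fold: the LAST peak whose window covers j wins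
lemma foldA_char (A : List Int) (X : Int) (hX : 1 ≤ X) :
    ∀ (ps : List Int), (∀ p ∈ ps, X ≤ p ∧ p + X < (A.length : Int)) →
      ∀ (B : List Int), B.length = A.length → ∀ j : Nat,
      (ps.foldl (fun B i => pvWriteWin B (i - X) (2*X + 1) (i + X + 1)
          (PySem.List.pyGetD A (i - X) 0)) B)[j]?
        = match ps.reverse.find? (pvHit X j) with
          | some p => some (PySem.List.pyGetD A (p - X) 0)
          | none => B[j]? := by
  intro ps
  induction ps using List.reverseRecOn with
  | nil => intro _ B hB j; rfl
  | append_singleton qs p ih =>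
    intro hb B hB j
    have hp := hb p (by simp)
    have hq : ∀ q ∈ qs, X ≤ q ∧ q + X < (A.length : Int) := fun q hq => hb q (by simp [hq])
    rw [List.foldl_append, List.foldl_cons, List.foldl_nil]
    rw [getElem?_pvWriteWin _ _ _ _ _ (by omega) (by omega) (by ring)
      (by have := foldA_length A X hX qs hq B hB; omega)]
    rw [List.reverse_append, List.reverse_singleton, List.singleton_append, List.find?_cons]
    by_cases hhit : pvHit X j p = true
    · have : p - X ≤ (j:Int) ∧ (j:Int) ≤ p + X := by simpa [pvHit] using hhit
      rw [if_pos ⟨this.1, by omega⟩, hhit]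
    · have : ¬ (p - X ≤ (j:Int) ∧ (j:Int) ≤ p + X) := by simpa [pvHit] using hhit
      rw [if_neg (by omega), Bool.of_not_eq_true hhit]
      exact ih hq B hB j

-- generic: foldl of (set k v) over any list of nonnegative indices
lemma setList_length (v : Int) :
    ∀ (ks : List Int) (b : List Int), (∀ k ∈ ks, 0 ≤ k) →
      (ks.foldl (fun c k => PySem.List.pySetD c k v) b).length = b.length := by
  intro ks
  induction ks with
  | nil => intro b _; rfl
  | cons k t ih =>
    intro b hk
    simp only [List.foldl_cons]
    rw [ih _ (fun x hx => hk x (List.mem_cons_of_mem _ hx)),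
      PySem.List.pySetD_of_nonneg b v (hk k List.mem_cons_self), List.length_set]

lemma setList_getElem? (v : Int) (j : Nat) :
    ∀ (ks : List Int) (b : List Int), (∀ k ∈ ks, 0 ≤ k) →
      (ks.foldl (fun c k => PySem.List.pySetD c k v) b)[j]? =
        if (j:Int) ∈ ks ∧ j < b.length then some v else b[j]? := by
  intro ks
  induction ks with
  | nil => intro b _; simp
  | cons k t ih =>
    intro b hk
    simp only [List.foldl_cons]
    rw [ih _ (fun x hx => hk x (List.mem_cons_of_mem _ hx))]
    have hset : PySem.List.pySetD b k v = b.set k.toNat v :=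
      PySem.List.pySetD_of_nonneg b v (hk k List.mem_cons_self)
    rw [hset]
    by_cases hmem : (j:Int) ∈ t
    · by_cases hlen : j < b.length
      · simp [hmem, hlen, List.length_set]
      · simp [hmem, hlen, List.length_set]
    · by_cases heq : (j:Int) = k
      · have : k.toNat = j := by omega
        by_cases hlen : j < b.length
        · simp [hmem, hlen, List.length_set, List.getElem?_set, this, heq]
        · simp [hmem, hlen, List.length_set, List.getElem?_set, this, heq]
      · have : ¬ k.toNat = j := by have := hk k List.mem_cons_self; omega
        simp [hmem, heq, List.length_set, List.getElem?_set, this]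

-- pointwise characterisation of B's right-to-left frontier fill
lemma foldB_char (A : List Int) (X : Int) (hX : 1 ≤ X) :
    ∀ (rps : List Int), rps.Pairwise (· > ·) →
      (∀ p ∈ rps, X ≤ p ∧ p + X < (A.length : Int)) →
      ∀ (f : Int) (B : List Int), (∀ p ∈ rps, p - X < f) → B.length = A.length → ∀ j : Nat,
      ((rps.foldl (pvFill A X) (B, f)).1)[j]?
        = if (j:Int) < f then
            (match rps.find? (pvHit X j) with
             | some p => some (PySem.List.pyGetD A (p - X) 0)
             | none => B[j]?)
          else B[j]? := by
  intro rps
  induction rps with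
  | nil => intro _ _ f B _ _ j; simp
  | cons p t ih =>
    intro hpw hb f B hf hB j
    have hp := hb p List.mem_cons_self
    have hfp := hf p List.mem_cons_self
    have hpw' := List.pairwise_cons.1 hpw
    have htl : ∀ q ∈ t, q < p := fun q hq => hpw'.1 q hq
    have hks : ∀ k ∈ PySem.List.pyRange (min (p + X) (f - 1)) (p - X - 1) (-1), 0 ≤ k :=
      fun k hk => by have := (PySem.List.mem_pyRange_neg_one).1 hk; omega
    have hB' := setList_length (PySem.List.pyGetD A (p - X) 0)
        (PySem.List.pyRange (min (p + X) (f - 1)) (p - X - 1) (-1)) B hks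
    have hgj := setList_getElem? (PySem.List.pyGetD A (p - X) 0) j
        (PySem.List.pyRange (min (p + X) (f - 1)) (p - X - 1) (-1)) B hks
    have hmem : ((j:Int) ∈ PySem.List.pyRange (min (p + X) (f - 1)) (p - X - 1) (-1)) ↔
        (p - X ≤ (j:Int) ∧ (j:Int) ≤ min (p + X) (f - 1)) := by
      rw [PySem.List.mem_pyRange_neg_one]; omega
    simp only [List.foldl_cons, pvFill]
    rw [ih hpw'.2 (fun q hq => hb q (List.mem_cons_of_mem _ hq)) (p - X) _
        (fun q hq => by have := htl q hq; omega) (by rw [hB']; exact hB) j]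
    rw [hgj]
    by_cases hhit : pvHit X j p = true
    · have hhit' : p - X ≤ (j:Int) ∧ (j:Int) ≤ p + X := by simpa [pvHit] using hhit
      rw [List.find?_cons_of_pos hhit, if_neg (by omega : ¬ ((j:Int) < p - X))]
      by_cases hjf : (j:Int) < f
      · rw [if_pos hjf, if_pos ⟨hmem.2 ⟨by omega, by omega⟩, by omega⟩]
      · rw [if_neg hjf, if_neg (fun h => by have := hmem.1 h.1; omega)]
    · have hhit' : ¬ (p - X ≤ (j:Int) ∧ (j:Int) ≤ p + X) := by simpa [pvHit] using hhit
      rw [List.find?_cons_of_neg hhit]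
      by_cases hjlo : (j:Int) < p - X
      · rw [if_pos hjlo, if_pos (by omega : (j:Int) < f)]
        cases t.find? (pvHit X j) with
        | some q => simp
        | none => rw [if_neg (fun h => by have := hmem.1 h.1; omega)]
      · rw [if_neg hjlo, if_neg (fun h => by have := hmem.1 h.1; omega)]
        have hnone : t.find? (pvHit X j) = none := List.find?_eq_none.2 (fun q hq => by
          have h1 := htl q hq
          simp only [pvHit, decide_eq_true_eq]
          omega)
        rw [hnone]
        simp

theorem simpledistortion_spec : Claim_equal_simpledistortion := by
  intro A X _ hXpre
  have hX : 1 ≤ X := hXpre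
  unfold Spec_simpledistortion
  have hbP : ∀ p ∈ (PySem.List.pyRange X ((A.length : Int) - X) 1).filter (pvPk A X),
      X ≤ p ∧ p + X < (A.length : Int) := by
    intro p hp
    have h1 := (List.mem_filter.1 hp).1
    have h2 := PySem.List.mem_pyRange_one.1 h1
    omega
  have hpw : ((PySem.List.pyRange X ((A.length : Int) - X) 1).filter (pvPk A X)).reverse.Pairwise
      (· > ·) := by
    rw [List.pairwise_reverse]
    exact (PySem.List.pairwise_lt_pyRange_one X ((A.length : Int) - X)).filter _
  simp only [simpledistortion, simpledistortion_alt, List.nil_append, List.map_id',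
    PySem.List.len_eq]
  rw [foldA_eq_filter]
  apply List.ext_getElem?
  intro j
  rw [foldA_char A X hX _ hbP A rfl j]
  rw [foldB_char A X hX _ hpw
      (fun p hp => hbP p (List.mem_reverse.1 hp)) ((A.length : Int)) A
      (fun p hp => by have := hbP p (List.mem_reverse.1 hp); omega) rfl j]
  by_cases hj : (j : Int) < (A.length : Int)
  · rw [if_pos hj]
  · rw [if_neg hj]
    have hnone : ((PySem.List.pyRange X ((A.length : Int) - X) 1).filter
        (pvPk A X)).reverse.find? (pvHit X j) = none := by
      refine List.find?_eq_none.2 (fun p hp => ?_)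
      have := hbP p (List.mem_reverse.1 hp)
      simp only [pvHit, decide_eq_true_eq]
      omega
    rw [hnone]
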